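-- pv_equiv track=rewrite | github.com/jayparmar16/GeorgeHacks_Food4All | backend/pipelines/ingest_haiti_geodata.py | find_best_resource
-- ===== SOURCE A (Python) =====
-- def find_best_resource(resources: list, preferred_formats=("SHP", "SHAPEFILE", "GEOJSON", "KML", "CSV", "XLSX", "XLS")):
--     for fmt in preferred_formats:
--         for r in resources:
--             if r.get("format", "").upper() == fmt:
--                 return r.get("url") or r.get("download_url", ""), fmt
--     # fallback: first downloadable
--     for r in resources:
--         url = r.get("url") or r.get("download_url", "")
--         if url:
--             return url, r.get("format", "UNKNOWN").upper()
--     return None, None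
-- ===== SOURCE B (Python) =====
-- def find_best_resource(resources: list, preferred_formats=("SHP", "SHAPEFILE", "GEOJSON", "KML", "CSV", "XLSX", "XLS")):
--     # Rank each preferred format by its first index, then select, in ONE pass over
--     # resources, the resource with the smallest rank (earliest resource wins ties).
--     rank = {}
--     for i, f in enumerate(preferred_formats):
--         rank.setdefault(f, i)
--     best = None
--     for r in resources:
--         i = rank.get(r.get("format", "").upper())
--         if i is not None and (best is None or i < best[0]):
--             best = (i, r)
--     if best is not None:
--         r = best[1]
--         return r.get("url") or r.get("download_url", ""), r.get("format", "").upper()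
--     # fallback: first downloadable
--     r = next((r for r in resources if r.get("url") or r.get("download_url", "")), None)
--     if r is not None:
--         return r.get("url") or r.get("download_url", ""), r.get("format", "UNKNOWN").upper()
--     return None, None
-- ===== Notes on version B (the rewrite author's own statement) =====
-- stated objective: faster
-- what changed: B replaces A's nested scan (for each preferred format, rescan the whole resource list) by ranking the preferred formats once (first index per format) and making a single pass over resources that keeps the resource of minimal rank, earliest resource winning ties; the fallback becomes a next()/find over resources.
import Mathlib
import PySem

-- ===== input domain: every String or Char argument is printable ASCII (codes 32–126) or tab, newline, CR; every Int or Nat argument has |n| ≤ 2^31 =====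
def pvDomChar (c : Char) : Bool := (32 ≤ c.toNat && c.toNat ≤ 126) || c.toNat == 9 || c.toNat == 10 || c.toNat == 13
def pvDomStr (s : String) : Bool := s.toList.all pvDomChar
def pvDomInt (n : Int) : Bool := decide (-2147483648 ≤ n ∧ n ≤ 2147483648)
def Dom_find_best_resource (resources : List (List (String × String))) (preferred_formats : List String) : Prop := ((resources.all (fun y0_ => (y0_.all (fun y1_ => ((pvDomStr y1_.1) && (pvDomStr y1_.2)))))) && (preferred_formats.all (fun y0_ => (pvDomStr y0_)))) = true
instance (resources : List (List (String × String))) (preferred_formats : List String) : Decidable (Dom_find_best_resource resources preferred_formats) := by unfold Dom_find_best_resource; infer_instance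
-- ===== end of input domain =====

-- B ranks the preferred formats once and selects, in one pass over resources, the
-- resource of minimal rank (earliest wins ties): O(F+R) vs A's O(F*R) nested scan.

-- ===== PORT A =====
-- r.get(k) / r.get(k, d): first match in the association list (shared by both ports)
def rget (r : List (String × String)) (k : String) : Option String :=
  (r.find? (fun p => p.1 == k)).map (·.2)

-- r.get("url") or r.get("download_url", "")  (None and "" are falsy; shared)
def urlOf (r : List (String × String)) : String :=
  let u := (rget r "url").getD ""
  if u == "" then (rget r "download_url").getD "" else u

-- r.get("format", "").upper()  (shared)
def fmtOf (r : List (String × String)) : String :=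
  PySem.Str.upper ((rget r "format").getD "")

-- inner 'for r in resources' of A's nested loop
def fbrInner (resources : List (List (String × String))) (fmt : String) :
    Option (Option String × Option String) :=
  match resources with
  | [] => none
  | r :: rs =>
    if fmtOf r == fmt then some (some (urlOf r), some fmt) else fbrInner rs fmt

-- outer 'for fmt in preferred_formats'
def fbrOuter (resources : List (List (String × String))) (fmts : List String) :
    Option (Option String × Option String) :=
  match fmts with
  | [] => none
  | f :: fs =>
    match fbrInner resources f with
    | some x => some x
    | none => fbrOuter resources fs

-- A's fallback loop: first resource with a truthy url
def fbrFallback (resources : List (List (String × String))) :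
    Option (Option String × Option String) :=
  match resources with
  | [] => none
  | r :: rs =>
    let url := urlOf r
    if url == "" then fbrFallback rs
    else some (some url, some (PySem.Str.upper ((rget r "format").getD "UNKNOWN")))

def find_best_resource (resources : List (List (String × String))) (preferred_formats : List String) : Option String × Option String :=
  match fbrOuter resources preferred_formats with
  | some x => x
  | none =>
    match fbrFallback resources with
    | some x => x
    | none => (none, none)

-- ===== PORT B =====
-- 'for i, f in enumerate(preferred_formats): rank.setdefault(f, i)'
def rankMap (fs : List String) : PySem.Dict String Int :=
  (PySem.List.enumerate fs).foldl (fun d p => d.setdefault p.2 p.1) PySem.Dict.empty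

-- loop body: 'i = rank.get(fmt); if i is not None and (best is None or i < best[0]): best = (i, r)'
def bestStep (d : PySem.Dict String Int)
    (best : Option (Int × List (String × String))) (r : List (String × String)) :
    Option (Int × List (String × String)) :=
  match d.get? (fmtOf r) with
  | none => best
  | some i =>
    match best with
    | none => some (i, r)
    | some (j, r0) => if i < j then some (i, r) else some (j, r0)

def find_best_resource_alt (resources : List (List (String × String))) (preferred_formats : List String) : Option String × Option String :=
  match resources.foldl (bestStep (rankMap preferred_formats)) none with
  | some (_, r) => (some (urlOf r), some (fmtOf r))
  | none =>
    -- next((r for r in resources if r.get("url") or r.get("download_url", "")), None)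
    match resources.find? (fun r => !(urlOf r == "")) with
    | some r => (some (urlOf r), some (PySem.Str.upper ((rget r "format").getD "UNKNOWN")))
    | none => (none, none)

-- ===== PRECONDITION & SPEC =====
def Spec_find_best_resource (resources : List (List (String × String))) (preferred_formats : List String) (out : Option String × Option String) : Prop := out = find_best_resource_alt resources preferred_formats
instance (resources : List (List (String × String))) (preferred_formats : List String) (out : Option String × Option String) : Decidable (Spec_find_best_resource resources preferred_formats out) := by unfold Spec_find_best_resource; infer_instance

-- ===== CLAIM =====
def Claim_equal_find_best_resource : Prop := ∀ (resources : List (List (String × String))) (preferred_formats : List String), Dom_find_best_resource resources preferred_formats → Spec_find_best_resource resources preferred_formats (find_best_resource resources preferred_formats)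

-- ===== LEMMAS AND PROOFS =====

-- first index of x in fs, as a recursion (proof-side model of the rank dict)
def idxR : List String → String → Option Int
  | [], _ => none
  | f :: fs, x => if x = f then some 0 else (idxR fs x).map (· + 1)

lemma idxR_nonneg (fs : List String) (x : String) (i : Int) (h : idxR fs x = some i) : 0 ≤ i := by
  induction fs generalizing i with
  | nil => simp [idxR] at h
  | cons f fs ih =>
    by_cases hx : x = f
    · simp [idxR, hx] at h; omega
    · simp only [idxR, if_neg hx] at h
      cases hj : idxR fs x with
      | none => simp [hj] at h
      | some j => rw [hj] at h; simp at h; have := ih j hj; omega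

lemma get?_rank_aux (fs : List String) (s : Int) (d : PySem.Dict String Int) (x : String) :
    ((PySem.List.enumerate fs s).foldl (fun d p => d.setdefault p.2 p.1) d).get? x =
      (match d.get? x with
       | some v => some v
       | none => (idxR fs x).map (· + s)) := by
  induction fs generalizing s d with
  | nil =>
    simp only [PySem.List.enumerate_nil, List.foldl_nil, idxR]
    cases d.get? x <;> rfl
  | cons f fs ih =>
    rw [PySem.List.enumerate_cons, List.foldl_cons, ih]
    by_cases hx : x = f
    · subst hx
      rw [PySem.Dict.get?_setdefault_self d x s]
      cases h : d.get? x with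
      | some v => simp
      | none => simp [idxR]
    · rw [PySem.Dict.get?_setdefault_of_ne _ _ hx]
      cases d.get? x with
      | some v => rfl
      | none =>
        simp only [idxR, if_neg hx]
        cases idxR fs x
        · rfl
        · simp; ring

lemma rankMap_get? (fs : List String) (x : String) :
    (rankMap fs).get? x = idxR fs x := by
  rw [rankMap, get?_rank_aux, PySem.Dict.get?_empty]
  cases idxR fs x <;> simp

-- left-biased min-by-key merge and the fold's recursive model
def mergeB : Option (Int × List (String × String)) → Option (Int × List (String × String)) →
    Option (Int × List (String × String))
  | none, b => b
  | some a, none => some a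
  | some (j, s), some (i, r) => if i < j then some (i, r) else some (j, s)

def bmin (k : List (String × String) → Option Int) :
    List (List (String × String)) → Option (Int × List (String × String))
  | [] => none
  | r :: rs => mergeB ((k r).map (fun i => (i, r))) (bmin k rs)

lemma mergeB_assoc (a b c : Option (Int × List (String × String))) :
    mergeB (mergeB a b) c = mergeB a (mergeB b c) := by
  rcases a with _ | ⟨j, s⟩
  · rfl
  rcases b with _ | ⟨i, r⟩
  · rcases c with _ | ⟨h, t⟩ <;> rfl
  rcases c with _ | ⟨h, t⟩
  · simp only [mergeB]
    split_ifs <;> rfl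
  · simp only [mergeB]
    split_ifs <;> (try simp only [mergeB]) <;> split_ifs <;> first | rfl | omega

lemma bestStep_eq (d : PySem.Dict String Int) (acc : Option (Int × List (String × String)))
    (r : List (String × String)) :
    bestStep d acc r = mergeB acc ((d.get? (fmtOf r)).map (fun i => (i, r))) := by
  unfold bestStep
  cases d.get? (fmtOf r) with
  | none => cases acc <;> rfl
  | some i => cases acc with
    | none => rfl
    | some p => cases p; rfl

lemma foldl_bestStep (d : PySem.Dict String Int) (rs : List (List (String × String)))
    (acc : Option (Int × List (String × String))) :
    rs.foldl (bestStep d) acc = mergeB acc (bmin (fun r => d.get? (fmtOf r)) rs) := by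
  induction rs generalizing acc with
  | nil => cases acc <;> rfl
  | cons r rs ih =>
    rw [List.foldl_cons, ih, bestStep_eq, mergeB_assoc]
    rfl

lemma bmin_none (k : List (String × String) → Option Int) (rs : List (List (String × String)))
    (h : ∀ r ∈ rs, k r = none) : bmin k rs = none := by
  induction rs with
  | nil => rfl
  | cons r rs ih =>
    have h1 : k r = none := h r (by simp)
    simp only [bmin, h1, Option.map_none, mergeB]
    exact ih (fun r hr => h r (by simp [hr]))

lemma bmin_nonneg (k : List (String × String) → Option Int) (rs : List (List (String × String)))
    (h0 : ∀ r i, k r = some i → 0 ≤ i) (j : Int) (s : List (String × String))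
    (h : bmin k rs = some (j, s)) : 0 ≤ j := by
  induction rs generalizing j s with
  | nil => simp [bmin] at h
  | cons r rs ih =>
    simp only [bmin] at h
    cases hk : k r with
    | none =>
      rw [hk] at h; simp only [Option.map_none, mergeB] at h
      exact ih j s h
    | some i =>
      rw [hk] at h; simp only [Option.map_some] at h
      cases hb : bmin k rs with
      | none =>
        rw [hb] at h
        simp only [mergeB, Option.some.injEq, Prod.mk.injEq] at h
        have := h0 r i hk
        omega
      | some p =>
        obtain ⟨j2, s2⟩ := p
        rw [hb] at h
        have hj2 := ih j2 s2 hb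
        have hi := h0 r i hk
        simp only [mergeB] at h
        split_ifs at h <;>
          simp only [Option.some.injEq, Prod.mk.injEq] at h <;> omega

lemma bmin_shift (k1 k2 : List (String × String) → Option Int)
    (rs : List (List (String × String)))
    (h : ∀ r ∈ rs, k1 r = (k2 r).map (· + 1)) :
    bmin k1 rs = (bmin k2 rs).map (fun p => (p.1 + 1, p.2)) := by
  induction rs with
  | nil => rfl
  | cons r rs ih =>
    have h1 : k1 r = (k2 r).map (· + 1) := h r (by simp)
    simp only [bmin, h1, ih (fun r hr => h r (by simp [hr]))]
    cases k2 r with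
    | none =>
      cases bmin k2 rs <;> simp [mergeB]
    | some i =>
      simp only [Option.map_some]
      cases hb : bmin k2 rs with
      | none => rfl
      | some p =>
        obtain ⟨j, s⟩ := p
        simp only [Option.map_some, mergeB]
        by_cases hij : j < i
        · rw [if_pos (by omega), if_pos hij]
          rfl
        · rw [if_neg (by omega), if_neg hij]
          rfl

lemma bmin_zero (k : List (String × String) → Option Int) (f : String)
    (rs : List (List (String × String))) (r0 : List (String × String))
    (h0 : ∀ r i, k r = some i → 0 ≤ i)
    (hiff : ∀ r, k r = some 0 ↔ fmtOf r = f)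
    (hfind : rs.find? (fun r => fmtOf r == f) = some r0) :
    bmin k rs = some (0, r0) := by
  induction rs with
  | nil => simp at hfind
  | cons r rs ih =>
    by_cases hrf : fmtOf r = f
    · rw [List.find?_cons_of_pos (p := fun r => fmtOf r == f) (by simp [hrf])] at hfind
      injection hfind with he
      subst he
      have hk : k r = some 0 := (hiff r).mpr hrf
      simp only [bmin, hk, Option.map_some]
      cases hb : bmin k rs with
      | none => rfl
      | some p =>
        obtain ⟨j, s⟩ := p
        have hj : 0 ≤ j := bmin_nonneg k rs h0 j s hb
        simp only [mergeB]
        rw [if_neg (by omega)]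
    · rw [List.find?_cons_of_neg (p := fun r => fmtOf r == f) (by simp [hrf])] at hfind
      have hrest := ih hfind
      simp only [bmin, hrest]
      cases hk : k r with
      | none => rfl
      | some i =>
        have hi0 : 0 ≤ i := h0 r i hk
        have hine : i ≠ 0 := fun h => hrf ((hiff r).mp (h ▸ hk))
        simp only [Option.map_some, mergeB]
        rw [if_pos (by omega)]

lemma fbrInner_eq_find? (rs : List (List (String × String))) (f : String) :
    fbrInner rs f = (rs.find? (fun r => fmtOf r == f)).map
      (fun r => (some (urlOf r), some f)) := by
  induction rs with
  | nil => rfl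
  | cons r rs ih =>
    by_cases h : (fmtOf r == f) = true
    · rw [List.find?_cons_of_pos (p := fun r => fmtOf r == f) h, fbrInner, if_pos h]
      rfl
    · rw [List.find?_cons_of_neg (p := fun r => fmtOf r == f) (by simp_all), fbrInner,
        if_neg (by simp_all), ih]

lemma fbrOuter_eq_bmin (fs : List String) (rs : List (List (String × String))) :
    fbrOuter rs fs = (bmin (fun r => idxR fs (fmtOf r)) rs).map
      (fun p => (some (urlOf p.2), some (fmtOf p.2))) := by
  induction fs with
  | nil =>
    rw [bmin_none (fun r => idxR [] (fmtOf r)) rs (fun r _ => rfl)]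
    rfl
  | cons f fs ih =>
    rw [fbrOuter, fbrInner_eq_find?]
    cases hfind : rs.find? (fun r => fmtOf r == f) with
    | none =>
      have hno : ∀ r ∈ rs, fmtOf r ≠ f := by
        intro r hr
        have := List.find?_eq_none.mp hfind r hr
        simpa using this
      rw [bmin_shift (fun r => idxR (f :: fs) (fmtOf r)) (fun r => idxR fs (fmtOf r)) rs
            (fun r hr => by simp only [idxR, if_neg (hno r hr)])]
      simp only [Option.map_none, ih]
      cases bmin (fun r => idxR fs (fmtOf r)) rs <;> rfl
    | some r0 =>
      have hr0 : fmtOf r0 = f := by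
        have := List.find?_some hfind
        simpa using this
      rw [bmin_zero (fun r => idxR (f :: fs) (fmtOf r)) f rs r0
            (fun r i h => idxR_nonneg _ _ i h)
            (fun r => by
              constructor
              · intro h
                by_contra hne
                simp only [idxR, if_neg hne] at h
                cases hj : idxR fs (fmtOf r) with
                | none => rw [hj] at h; simp at h
                | some j => rw [hj] at h; simp at h
                            have := idxR_nonneg fs (fmtOf r) j hj; omega
              · intro h; simp [idxR, h])
            hfind]
      simp [hr0]

lemma fbrFallback_eq_find? (rs : List (List (String × String))) :
    fbrFallback rs = (rs.find? (fun r => !(urlOf r == ""))).map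
      (fun r => (some (urlOf r), some (PySem.Str.upper ((rget r "format").getD "UNKNOWN")))) := by
  induction rs with
  | nil => rfl
  | cons r rs ih =>
    by_cases h : (urlOf r == "") = true
    · rw [List.find?_cons_of_neg (p := fun r => !(urlOf r == "")) (by simp [h]), fbrFallback]
      simp [h, ih]
    · have hb : (urlOf r == "") = false := by simp_all
      rw [List.find?_cons_of_pos (p := fun r => !(urlOf r == "")) (by simp [hb]), fbrFallback]
      simp [hb]

-- ===== VERDICT =====
theorem find_best_resource_spec : Claim_equal_find_best_resource := by
  intro resources preferred_formats _
  unfold Spec_find_best_resource find_best_resource find_best_resource_alt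
  rw [foldl_bestStep]
  have hk : (fun r => (rankMap preferred_formats).get? (fmtOf r)) =
      (fun r => idxR preferred_formats (fmtOf r)) := by
    funext r; exact rankMap_get? preferred_formats (fmtOf r)
  rw [hk, fbrOuter_eq_bmin]
  cases bmin (fun r => idxR preferred_formats (fmtOf r)) resources with
  | some p =>
    obtain ⟨i, r⟩ := p
    rfl
  | none =>
    simp only [Option.map_none, mergeB, fbrFallback_eq_find?]
    cases resources.find? (fun r => !(urlOf r == "")) <;> rfl
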